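-- pv_equiv track=rewrite | github.com/AMYMEME/algorithm-study | amymeme/20210629/단어 퍼즐.py | solution
-- ===== SOURCE A (Python) =====
-- import heapq
--
-- def solution(strs, t):
--     pq = []
--     satis_length_set = {0}
--     heapq.heappush(pq, (0, 0))
--     while pq:
--         str_cnt, satis_length = heapq.heappop(pq)
--         if satis_length == len(t):
--             return str_cnt
--         if satis_length > len(t):
--             break
--         goal_str = t[satis_length:]
--         for word in strs:
--             if goal_str.find(word) == 0:
--                 if satis_length + len(word) in satis_length_set:
--                     continue
--                 heapq.heappush(pq, (str_cnt + 1, satis_length + len(word)))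
--     return -1
-- ===== SOURCE B (Python) =====
-- def solution(strs, t):
--     # Bottom-up DP over target positions: dp[i] = min words to spell t[i:].
--     n = len(t)
--     INF = n + 1
--     dp = [INF] * n + [0]
--     for i in range(n - 1, -1, -1):
--         best = INF
--         for w in strs:
--             j = i + len(w)
--             if t[i:j] == w and dp[j] + 1 < best:
--                 best = dp[j] + 1
--         dp[i] = best
--     return dp[0] if dp[0] <= n else -1
-- ===== Notes on version B (the rewrite author's own statement) =====
-- stated objective: alternative
-- what changed: Replaced A's heap-based best-first search without a visited set (it can re-expand the same target position many times) by a bottom-up DP over target positions dp[i] = min words to spell t[i:].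
import Mathlib
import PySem

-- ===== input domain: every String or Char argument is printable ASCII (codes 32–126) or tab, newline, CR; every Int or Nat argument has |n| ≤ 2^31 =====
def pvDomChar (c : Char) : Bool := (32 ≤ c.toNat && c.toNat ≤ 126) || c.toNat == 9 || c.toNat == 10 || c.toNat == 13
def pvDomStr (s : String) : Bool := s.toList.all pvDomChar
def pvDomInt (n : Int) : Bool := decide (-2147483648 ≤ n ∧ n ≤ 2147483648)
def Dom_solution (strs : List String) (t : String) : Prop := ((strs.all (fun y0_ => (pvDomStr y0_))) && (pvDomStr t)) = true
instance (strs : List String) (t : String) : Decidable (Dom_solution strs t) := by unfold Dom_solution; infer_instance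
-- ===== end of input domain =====

-- B replaces A's heap-based best-first search (which has no visited set and can
-- re-expand the same target position many times) by a bottom-up DP over target
-- positions dp[i] = min words needed to spell t[i:].

-- ===== PORT A =====
-- heapq is modelled as a list kept sorted by the tuple order:
-- heappush = ordered insert (hpushA), heappop = take the head (the minimum).
-- Distinct entries with equal tuples are interchangeable, so this is exact.
def hpushA (e : Int × Int) : List (Int × Int) → List (Int × Int)
  | [] => [e]
  | x :: xs =>
    if e.1 < x.1 ∨ (e.1 = x.1 ∧ e.2 ≤ x.2) then e :: x :: xs else x :: hpushA e xs

-- body of A's `for word in strs:` loop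
def pushStepA (sset : PySem.Set Int) (goal_str : String) (str_cnt satis_length : Int)
    (pq : List (Int × Int)) (word : String) : List (Int × Int) :=
  if PySem.Str.find goal_str word = 0 then
    if PySem.Set.contains sset (satis_length + PySem.Str.len word) then pq
    else hpushA (str_cnt + 1, satis_length + PySem.Str.len word) pq
  else pq

-- A's `while pq:` loop. The fuel is a totality guard only (with '' ∈ strs and t
-- not spellable the Python loop can run forever); under Pre_solution it is proved
-- never to run out.
def loopA (strs : List String) (t : String) (sset : PySem.Set Int) :
    Nat → List (Int × Int) → Option Int
  | _, [] => some (-1)                                   -- while-loop ends: return -1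
  | 0, _ :: _ => none                                    -- out of fuel (unreachable under Pre_)
  | fuel + 1, (str_cnt, satis_length) :: pq =>
    if satis_length = PySem.Str.len t then some str_cnt
    else if PySem.Str.len t < satis_length then some (-1)  -- break, then return -1
    else
      loopA strs t sset fuel
        (strs.foldl
          (pushStepA sset (PySem.Str.slice t (some satis_length) none) str_cnt satis_length) pq)

def solution (strs : List String) (t : String) : Int :=
  ((loopA strs t (PySem.Set.ofList [(0 : Int)])
      ((strs.length + 1) ^ (t.length + 1) + 1) [(0, 0)]).getD (-1))

-- ===== PORT B =====
-- body of B's `for w in strs:` loop: running minimum `best` (starts at INF = n+1)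
def bInner (strs : List String) (t : String) (dp : List Int) (i : Int) : Int :=
  strs.foldl (fun best w =>
    -- dp[j] is only read when t[i:j] == w, which forces 0 ≤ j ≤ n, in range
    if PySem.Str.slice t (some i) (some (i + PySem.Str.len w)) = w ∧
        PySem.List.pyGetD dp (i + PySem.Str.len w) 0 + 1 < best
    then PySem.List.pyGetD dp (i + PySem.Str.len w) 0 + 1 else best)
    (PySem.Str.len t + 1)

-- `dp[i] = best` (0 ≤ i < n on every iteration of B's loop, so .toNat is exact)
def bOuter (strs : List String) (t : String) (dp : List Int) (i : Int) : List Int :=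
  dp.set i.toNat (bInner strs t dp i)

def solution_alt (strs : List String) (t : String) : Int :=
  let n : Int := PySem.Str.len t
  let dp := (PySem.List.pyRange (n - 1) (-1) (-1)).foldl (bOuter strs t)
      (List.replicate t.length (n + 1) ++ [0])           -- [INF] * n + [0]
  if PySem.List.pyGetD dp 0 0 ≤ n then PySem.List.pyGetD dp 0 0 else -1

-- ===== PRECONDITION & SPEC =====
-- Helpers Pre_solution needs: minimum on Option Nat (none = +infinity), usable words,
-- and Fm strs cs p = minimal number of words of strs spelling cs[p:] (none if impossible).
def ominN : Option Nat → Option Nat → Option Nat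
  | none, b => b
  | some a, none => some a
  | some a, some b => some (min a b)

-- the words usable at position p of cs (nonempty and a prefix of the rest)
def wordOK (cs : List Char) (p : Nat) (w : String) : Bool :=
  decide (w ≠ "") && decide (w.toList <+: cs.drop p)

lemma wordOK_facts {cs : List Char} {p : Nat} {w : String} (h : wordOK cs p w = true) :
    1 ≤ w.length ∧ p + w.length ≤ cs.length := by
  simp only [wordOK, Bool.and_eq_true, decide_eq_true_eq] at h
  obtain ⟨h1, h2⟩ := h
  have hlen : w.toList.length ≤ (cs.drop p).length := h2.length_le
  have hne : w.toList ≠ [] := by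
    intro hc; apply h1; apply String.toList_inj.mp; simpa using hc
  have hpos : 1 ≤ w.toList.length := by
    cases hw : w.toList with
    | nil => exact absurd hw hne
    | cons a l => simp
  have hwl : w.length = w.toList.length := rfl
  simp only [List.length_drop] at hlen
  omega

def Fm (strs : List String) (cs : List Char) (p : Nat) : Option Nat :=
  if p = cs.length then some 0
  else
    (((strs.filter (wordOK cs p)).attach).map
        (fun w => (Fm strs cs (p + w.1.length)).map (· + 1))).foldr ominN none
termination_by cs.length - p
decreasing_by
  have hm := List.mem_filter.mp w.2
  have := wordOK_facts hm.2
  have hne : p ≠ cs.length := by assumption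
  omega

-- Pre_ excludes exactly the inputs on which Python A never returns: when '' ∈ strs,
-- t is NOT spellable from strs (Fm … = none) and some nonempty word of strs is a
-- prefix of t, A reaches a position > 0, the empty word re-queues that position
-- forever (A never updates its visited set) and the goal is never reached, so the
-- while-loop diverges.  On every other input A returns normally (in particular,
-- whenever t IS spellable A returns the minimal count even with '' ∈ strs).
def Pre_solution (strs : List String) (t : String) : Prop :=
  ¬ ("" ∈ strs ∧ Fm strs t.toList 0 = none ∧ ∃ w ∈ strs, w ≠ "" ∧ w.toList <+: t.toList)

instance (strs : List String) (t : String) : Decidable (Pre_solution strs t) := by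
  unfold Pre_solution; infer_instance

def pvWitness_solution : List String × String := (["ab", "c", "abc"], "abcab")

def Spec_solution (strs : List String) (t : String) (out : Int) : Prop := out = solution_alt strs t
instance (strs : List String) (t : String) (out : Int) : Decidable (Spec_solution strs t out) := by unfold Spec_solution; infer_instance

-- ===== CLAIM (what is proved, stated in full; the proofs are below) =====
def Claim_equal_solution : Prop := ∀ (strs : List String) (t : String), Dom_solution strs t → Pre_solution strs t → Spec_solution strs t (solution strs t)

-- ===== LEMMAS AND PROOFS =====

-- min on Option Int, with none = +infinity
def ominI : Option Int → Option Int → Option Int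
  | none, b => b
  | some a, none => some a
  | some a, some b => some (min a b)

lemma Fm_eq (strs : List String) (cs : List Char) (p : Nat) :
    Fm strs cs p =
      if p = cs.length then some 0
      else ((strs.filter (wordOK cs p)).map
          (fun w => (Fm strs cs (p + w.length)).map (· + 1))).foldr ominN none := by
  rw [Fm]
  congr 1
  rw [← List.attach_map_val (l := strs.filter (wordOK cs p))
      (f := fun w => (Fm strs cs (p + w.length)).map (· + 1))]

lemma Fm_len (strs : List String) (cs : List Char) : Fm strs cs cs.length = some 0 := by
  rw [Fm_eq]; simp

lemma foldr_ominN_mem {l : List (Option Nat)} {k : Nat}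
    (h : l.foldr ominN none = some k) : some k ∈ l := by
  induction l with
  | nil => simp at h
  | cons a l ih =>
    simp only [List.foldr] at h
    cases ha : a with
    | none =>
      rw [ha] at h; simp only [ominN] at h
      exact List.mem_cons_of_mem _ (ih h)
    | some x =>
      rw [ha] at h
      cases hl : l.foldr ominN none with
      | none =>
        rw [hl] at h; simp only [ominN, Option.some.injEq] at h
        subst h; simp
      | some y =>
        rw [hl] at h; simp only [ominN, Option.some.injEq] at h
        rcases le_total x y with hxy | hxy
        · rw [min_eq_left hxy] at h; subst h; simp
        · rw [min_eq_right hxy] at h; subst h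
          exact List.mem_cons_of_mem _ (ih hl)

lemma Fm_le (strs : List String) (cs : List Char) :
    ∀ d p k, cs.length - p = d → Fm strs cs p = some k → p + k ≤ cs.length := by
  intro d
  induction d using Nat.strong_induction_on with
  | _ d ih =>
    intro p k hd hF
    rw [Fm_eq] at hF
    by_cases hp : p = cs.length
    · simp [hp] at hF; omega
    · simp only [if_neg hp] at hF
      have hmem := foldr_ominN_mem hF
      simp only [List.mem_map] at hmem
      obtain ⟨w, hw, hval⟩ := hmem
      have hok := (List.mem_filter.mp hw).2
      obtain ⟨h1, h2⟩ := wordOK_facts hok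
      cases hF' : Fm strs cs (p + w.length) with
      | none => rw [hF'] at hval; simp at hval
      | some k' =>
        rw [hF'] at hval
        simp only [Option.map_some, Option.some.injEq] at hval
        have := ih (cs.length - (p + w.length)) (by omega) (p + w.length) k' rfl hF'
        omega

-- ---- A-side machinery ----

def ocostA (strs : List String) (cs : List Char) (e : Int × Int) : Option Int :=
  (Fm strs cs e.2.toNat).map (fun k => e.1 + (k : Int))

def obest (strs : List String) (cs : List Char) (l : List (Int × Int)) : Option Int :=
  l.foldr (fun e acc => ominI (ocostA strs cs e) acc) none

def PLe (a b : Int × Int) : Prop := a.1 < b.1 ∨ (a.1 = b.1 ∧ a.2 ≤ b.2)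

def WtA (m Lc : Nat) (e : Int × Int) : Nat := (m + 1) ^ (Lc + 1 - e.2.toNat)

def WqA (m Lc : Nat) (l : List (Int × Int)) : Nat := (l.map (WtA m Lc)).sum

lemma ominI_left_comm (a b c : Option Int) : ominI a (ominI b c) = ominI b (ominI a c) := by
  cases a <;> cases b <;> cases c <;> simp [ominI] <;> omega

lemma ominI_assoc (a b c : Option Int) : ominI (ominI a b) c = ominI a (ominI b c) := by
  cases a <;> cases b <;> cases c <;> simp [ominI] <;> omega

lemma hpushA_perm (e : Int × Int) (l : List (Int × Int)) :
    List.Perm (hpushA e l) (e :: l) := by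
  induction l with
  | nil => simp [hpushA]
  | cons x xs ih =>
    rw [hpushA]
    split_ifs with hle
    · exact List.Perm.refl _
    · exact (ih.cons x).trans (List.Perm.swap e x xs)

lemma pairwise_hpushA (e : Int × Int) (l : List (Int × Int)) (h : l.Pairwise PLe) :
    (hpushA e l).Pairwise PLe := by
  induction l with
  | nil => simp [hpushA]
  | cons x xs ih =>
    rw [hpushA]
    rw [List.pairwise_cons] at h
    split_ifs with hle
    · refine List.Pairwise.cons ?_ (List.Pairwise.cons h.1 h.2)
      intro b hb
      rcases List.mem_cons.mp hb with rfl | hb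
      · exact hle
      · have := h.1 b hb
        unfold PLe at *; omega
    · refine List.Pairwise.cons ?_ (ih h.2)
      intro b hb
      rcases List.mem_cons.mp ((hpushA_perm e xs).mem_iff.mp hb) with rfl | hb
      · unfold PLe at *; omega
      · exact h.1 b hb

lemma obest_perm {strs : List String} {cs : List Char} {l l' : List (Int × Int)}
    (h : List.Perm l l') : obest strs cs l = obest strs cs l' := by
  induction h with
  | nil => rfl
  | cons x _ ih => simp only [obest, List.foldr] at *; rw [ih]
  | swap x y l => simp only [obest, List.foldr]; rw [ominI_left_comm]
  | trans _ _ ih1 ih2 => rw [ih1, ih2]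

lemma obest_ge {strs : List String} {cs : List Char} (c : Int) :
    ∀ (l : List (Int × Int)), (∀ e ∈ l, c ≤ e.1) →
      ∀ v, obest strs cs l = some v → c ≤ v := by
  intro l
  induction l with
  | nil => intro _ v hv; simp [obest] at hv
  | cons e l ih =>
    intro hmem v hv
    simp only [obest, List.foldr] at hv
    have hce : c ≤ e.1 := hmem e (by simp)
    cases ho : ocostA strs cs e with
    | none =>
      rw [ho] at hv; simp only [ominI] at hv
      exact ih (fun x hx => hmem x (by simp [hx])) v hv
    | some ve =>
      have hvee : c ≤ ve := by
        simp only [ocostA] at ho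
        cases hF : Fm strs cs e.2.toNat with
        | none => rw [hF] at ho; simp at ho
        | some k => rw [hF] at ho; simp at ho; omega
      rw [ho] at hv
      cases hl : (l.foldr (fun e acc => ominI (ocostA strs cs e) acc) none) with
      | none => rw [hl] at hv; simp only [ominI, Option.some.injEq] at hv; omega
      | some vl =>
        rw [hl] at hv; simp only [ominI, Option.some.injEq] at hv
        have := ih (fun x hx => hmem x (by simp [hx])) vl hl
        omega

-- the attained minimum: obest = some v means some entry has cost exactly v
lemma obest_mem {strs : List String} {cs : List Char} :
    ∀ (l : List (Int × Int)) (v : Int), obest strs cs l = some v →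
      ∃ e ∈ l, ocostA strs cs e = some v := by
  intro l
  induction l with
  | nil => intro v hv; simp [obest] at hv
  | cons e l ih =>
    intro v hv
    simp only [obest, List.foldr] at hv
    cases ho : ocostA strs cs e with
    | none =>
      rw [ho] at hv; simp only [ominI] at hv
      obtain ⟨e', he', hc'⟩ := ih v hv
      exact ⟨e', by simp [he'], hc'⟩
    | some ve =>
      rw [ho] at hv
      cases hl : (l.foldr (fun e acc => ominI (ocostA strs cs e) acc) none) with
      | none =>
        rw [hl] at hv; simp only [ominI, Option.some.injEq] at hv
        exact ⟨e, by simp, by rw [ho, hv]⟩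
      | some vl =>
        rw [hl] at hv; simp only [ominI, Option.some.injEq] at hv
        rcases le_total ve vl with hle | hle
        · rw [min_eq_left hle] at hv
          exact ⟨e, by simp, by rw [ho, hv]⟩
        · rw [min_eq_right hle] at hv
          obtain ⟨e', he', hc'⟩ := ih vl hl
          exact ⟨e', by simp [he'], by rw [hc', hv]⟩

lemma ominI_none_iff (a b : Option Int) : ominI a b = none ↔ a = none ∧ b = none := by
  cases a <;> cases b <;> simp [ominI]

lemma obest_none {strs : List String} {cs : List Char} :
    ∀ (l : List (Int × Int)), obest strs cs l = none → ∀ e ∈ l, ocostA strs cs e = none := by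
  intro l
  induction l with
  | nil => intro _ e he; simp at he
  | cons a l ih =>
    intro h e he
    simp only [obest, List.foldr, ominI_none_iff] at h
    rcases List.mem_cons.mp he with rfl | he'
    · exact h.1
    · exact ih h.2 e he'

-- every entry's cost is at least obest
lemma obest_lb {strs : List String} {cs : List Char} :
    ∀ (l : List (Int × Int)) (u : Int), obest strs cs l = some u →
      ∀ e ∈ l, ∀ v, ocostA strs cs e = some v → u ≤ v := by
  intro l
  induction l with
  | nil => intro u hu; simp [obest] at hu
  | cons e l ih =>
    intro u hu e' he' v hv
    simp only [obest, List.foldr] at hu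
    rcases List.mem_cons.mp he' with rfl | he'
    · rw [hv] at hu
      cases hl : (l.foldr (fun e acc => ominI (ocostA strs cs e) acc) none) with
      | none => rw [hl] at hu; simp only [ominI, Option.some.injEq] at hu; omega
      | some vl =>
        rw [hl] at hu; simp only [ominI, Option.some.injEq] at hu
        omega
    · cases hl : (l.foldr (fun e acc => ominI (ocostA strs cs e) acc) none) with
      | none =>
        exfalso
        have hnone : ocostA strs cs e' = none := obest_none l hl e' he'
        rw [hv] at hnone
        exact Option.some_ne_none v hnone
      | some vl =>
        have hvl := ih vl hl e' he' v hv
        rw [hl] at hu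
        cases ho : ocostA strs cs e with
        | none => rw [ho] at hu; simp only [ominI, Option.some.injEq] at hu; omega
        | some ve => rw [ho] at hu; simp only [ominI, Option.some.injEq] at hu; omega

lemma WqA_perm {m Lc : Nat} {l l' : List (Int × Int)} (h : List.Perm l l') :
    WqA m Lc l = WqA m Lc l' := by
  unfold WqA
  exact List.Perm.sum_eq (h.map _)

lemma WqA_append (m Lc : Nat) (l l' : List (Int × Int)) :
    WqA m Lc (l ++ l') = WqA m Lc l + WqA m Lc l' := by
  simp [WqA]

-- find(goal, w) == 0 means w is a prefix
lemma find_eq_zero_iff (s w : List Char) : PySem.Chars.find s w = 0 ↔ w <+: s := by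
  constructor
  · intro h
    have h0 : (0 : Int) ≤ PySem.Chars.find s w := by omega
    have := (PySem.Chars.find_spec h0).1
    rw [h] at this; simpa using this
  · intro h
    have h0 : (0 : Int) ≤ PySem.Chars.find s w := by
      rw [PySem.Chars.find_nonneg_iff]; exact h.isInfix
    rcases PySem.Chars.find_spec h0 with ⟨_, hmin⟩
    by_contra hne
    have : 0 < (PySem.Chars.find s w).toNat := by omega
    exact hmin 0 this (by simpa using h)

lemma goal_toList (t : String) (p : Int) (hp : 0 ≤ p) :
    (PySem.Str.slice t (some p) none).toList = t.toList.drop p.toNat := by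
  rw [PySem.Str.toList_slice]
  simp only [PySem.Chars.slice_eq_listSlice]
  exact PySem.List.slice_from _ hp

lemma contains_zero_set (x : Int) :
    PySem.Set.contains (PySem.Set.ofList [(0 : Int)]) x = decide (x = 0) := by
  simp [PySem.Set.contains, PySem.Set.ofList]

lemma strlen_eq (w : String) : PySem.Str.len w = (w.length : Int) := by
  simp [PySem.Str.len]

-- find condition of A's inner loop = 'w is a prefix of t[p:]'
lemma pushA_prefix (t : String) (w : String) (p : Int) (hp : 0 ≤ p) :
    (PySem.Str.find (PySem.Str.slice t (some p) none) w = 0)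
      ↔ w.toList <+: t.toList.drop p.toNat := by
  have h1 : PySem.Str.find (PySem.Str.slice t (some p) none) w
      = PySem.Chars.find (t.toList.drop p.toNat) w.toList := by
    rw [PySem.Str.find_eq, goal_toList t p hp]
  rw [h1, find_eq_zero_iff]

-- word actually pushed: a prefix, and the visited-set {0} does not skip it
-- (it only skips the empty word at position 0)
def wordOK2 (cs : List Char) (p : Nat) (w : String) : Bool :=
  decide (w.toList <+: cs.drop p) && !(decide (p = 0 ∧ w.length = 0))

lemma wordOK2_iff (cs : List Char) (p : Nat) (w : String) :
    wordOK2 cs p w = true ↔ (w.toList <+: cs.drop p ∧ ¬ (p = 0 ∧ w.length = 0)) := by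
  simp only [wordOK2, Bool.and_eq_true, Bool.not_eq_eq_eq_not, Bool.not_true,
    decide_eq_true_eq, decide_eq_false_iff_not]

lemma wordOK_iff (cs : List Char) (p : Nat) (w : String) :
    wordOK cs p w = true ↔ (w ≠ "" ∧ w.toList <+: cs.drop p) := by
  simp [wordOK]

lemma bool_eq_of_iff {a b : Bool} (h : (a = true) ↔ (b = true)) : a = b := by
  cases a <;> cases b <;> simp_all

lemma wordOK2_facts {cs : List Char} {p : Nat} {w : String} (hple : p ≤ cs.length)
    (h : wordOK2 cs p w = true) : p + w.length ≤ cs.length := by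
  rw [wordOK2_iff] at h
  have hlen : w.toList.length ≤ (cs.drop p).length := h.1.length_le
  have hwl : w.length = w.toList.length := rfl
  simp only [List.length_drop] at hlen
  by_cases hw0 : w.length = 0
  · omega
  · omega

-- children created by one pass of the inner for-loop
def childrenA (cs : List Char) (c p : Int) (ws : List String) : List (Int × Int) :=
  (ws.filter (wordOK2 cs p.toNat)).map (fun w => (c + 1, p + (w.length : Int)))

lemma foldl_pushA_perm {strs : List String} {t : String} (c p : Int) (hp : 0 ≤ p) :
    ∀ (ws : List String) (pq0 : List (Int × Int)),
      List.Perm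
        (ws.foldl (pushStepA (PySem.Set.ofList [(0 : Int)])
          (PySem.Str.slice t (some p) none) c p) pq0)
        (childrenA t.toList c p ws ++ pq0) := by
  intro ws
  induction ws with
  | nil => intro pq0; simp [childrenA]
  | cons w ws ih =>
    intro pq0
    simp only [List.foldl_cons]
    by_cases hcond : PySem.Str.find (PySem.Str.slice t (some p) none) w = 0
    · have hpre : w.toList <+: t.toList.drop p.toNat := (pushA_prefix t w p hp).mp hcond
      by_cases hskip : p + (w.length : Int) = 0
      · -- visited-set hit: p = 0 and w = '' → skipped
        have hok : wordOK2 t.toList p.toNat w = false := by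
          have : ¬ (wordOK2 t.toList p.toNat w = true) := by
            rw [wordOK2_iff]
            rintro ⟨-, hne⟩
            exact hne ⟨by omega, by omega⟩
          simpa using this
        have hstep : pushStepA (PySem.Set.ofList [(0 : Int)])
            (PySem.Str.slice t (some p) none) c p pq0 w = pq0 := by
          simp only [pushStepA, contains_zero_set, strlen_eq]
          rw [if_pos hcond, if_pos (by simpa using hskip)]
        rw [hstep]
        have h3 : childrenA t.toList c p (w :: ws) = childrenA t.toList c p ws := by
          simp [childrenA, hok]
        rw [h3]
        exact ih pq0
      · have hok : wordOK2 t.toList p.toNat w = true := by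
          rw [wordOK2_iff]
          refine ⟨hpre, ?_⟩
          rintro ⟨h1, h2⟩
          exact hskip (by omega)
        have hstep : pushStepA (PySem.Set.ofList [(0 : Int)])
            (PySem.Str.slice t (some p) none) c p pq0 w
            = hpushA (c + 1, p + (w.length : Int)) pq0 := by
          simp only [pushStepA, contains_zero_set, strlen_eq]
          rw [if_pos hcond, if_neg (by simpa using hskip)]
        rw [hstep]
        have h1 := ih (hpushA (c + 1, p + (w.length : Int)) pq0)
        refine h1.trans ?_
        have h2 : List.Perm
            (childrenA t.toList c p ws ++ hpushA (c + 1, p + (w.length : Int)) pq0)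
            (childrenA t.toList c p ws ++ ((c + 1, p + (w.length : Int)) :: pq0)) :=
          List.Perm.append_left _ (hpushA_perm _ _)
        refine h2.trans ?_
        have h3 : childrenA t.toList c p (w :: ws)
            = (c + 1, p + (w.length : Int)) :: childrenA t.toList c p ws := by
          simp [childrenA, hok]
        rw [h3]
        exact List.perm_middle
    · have hok : wordOK2 t.toList p.toNat w = false := by
        by_contra hc
        have hc' : wordOK2 t.toList p.toNat w = true := by simpa using hc
        rw [wordOK2_iff] at hc'
        exact hcond ((pushA_prefix t w p hp).mpr hc'.1)
      have hstep : pushStepA (PySem.Set.ofList [(0 : Int)])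
          (PySem.Str.slice t (some p) none) c p pq0 w = pq0 := by
        simp only [pushStepA]
        rw [if_neg hcond]
      rw [hstep]
      have h3 : childrenA t.toList c p (w :: ws) = childrenA t.toList c p ws := by
        simp [childrenA, hok]
      rw [h3]
      exact ih pq0

-- Pairwise is preserved by the inner loop
lemma foldl_pushA_pairwise (sset : PySem.Set Int) (goal : String) (c p : Int) :
    ∀ (ws : List String) (pq0 : List (Int × Int)), pq0.Pairwise PLe →
      (ws.foldl (pushStepA sset goal c p) pq0).Pairwise PLe := by
  intro ws
  induction ws with
  | nil => intro pq0 h; simpa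
  | cons w ws ih =>
    intro pq0 h
    simp only [List.foldl_cons]
    apply ih
    unfold pushStepA
    split
    · split
      · exact h
      · exact pairwise_hpushA _ _ h
    · exact h

-- mapping the Nat option-min through (c + ·) into Int
def liftC (c : Int) (o : Option Nat) : Option Int := o.map (fun k => c + (k : Int))

lemma liftC_omin (c : Int) (a b : Option Nat) :
    liftC c (ominN a b) = ominI (liftC c a) (liftC c b) := by
  cases a <;> cases b <;> simp [liftC, ominN, ominI] <;> omega

-- cost of a block of children built from an arbitrary word list bs
lemma obest_map_children {strs : List String} (cs : List Char) (c p : Int) (hp : 0 ≤ p) :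
    ∀ (bs : List String) (rest : List (Int × Int)),
      obest strs cs ((bs.map (fun w => (c + 1, p + (w.length : Int)))) ++ rest)
        = ominI (liftC c
            ((bs.map (fun w => (Fm strs cs (p.toNat + w.length)).map (· + 1))).foldr ominN none))
          (obest strs cs rest) := by
  intro bs
  induction bs with
  | nil => intro rest; simp [liftC, ominI]
  | cons w bs ih =>
    intro rest
    simp only [List.map_cons, List.cons_append, List.foldr]
    have hL : obest strs cs ((c + 1, p + (w.length : Int)) ::
        ((bs.map (fun w => (c + 1, p + (w.length : Int)))) ++ rest))
        = ominI (ocostA strs cs (c + 1, p + (w.length : Int)))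
            (obest strs cs ((bs.map (fun w => (c + 1, p + (w.length : Int)))) ++ rest)) := rfl
    rw [hL, ih, liftC_omin, ← ominI_assoc]
    congr 2
    · simp only [ocostA, liftC]
      have ht : (p + (w.length : Int)).toNat = p.toNat + w.length := by omega
      rw [ht]
      cases Fm strs cs (p.toNat + w.length) with
      | none => rfl
      | some k =>
        simp
        push_cast
        ring

-- ominN bookkeeping for splitting off the empty-word copies
lemma ominN_none_right (a : Option Nat) : ominN a none = a := by cases a <;> rfl

lemma ominN_assoc (a b c : Option Nat) : ominN (ominN a b) c = ominN a (ominN b c) := by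
  cases a <;> cases b <;> cases c <;> simp [ominN] <;> omega

lemma foldr_ominN_init (l : List (Option Nat)) (x : Option Nat) :
    l.foldr ominN x = ominN (l.foldr ominN none) x := by
  induction l with
  | nil => cases x <;> rfl
  | cons a l ih =>
    simp only [List.foldr]
    rw [ih, ← ominN_assoc]

lemma foldr_ominN_append (l1 l2 : List (Option Nat)) :
    (l1 ++ l2).foldr ominN none = ominN (l1.foldr ominN none) (l2.foldr ominN none) := by
  rw [List.foldr_append, foldr_ominN_init]

lemma foldr_ominN_perm {l l' : List (Option Nat)} (h : List.Perm l l') :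
    l.foldr ominN none = l'.foldr ominN none := by
  induction h with
  | nil => rfl
  | cons x _ ih => simp only [List.foldr]; rw [ih]
  | swap x y l =>
    simp only [List.foldr]
    rw [← ominN_assoc, ← ominN_assoc]
    congr 1
    cases x <;> cases y <;> simp [ominN] <;> omega
  | trans _ _ ih1 ih2 => rw [ih1, ih2]

-- the filter by wordOK2 splits (as a permutation) into the nonempty matches
-- (= filter by wordOK) and the empty-word copies (when p ≠ 0)
lemma filter_wordOK2_split (cs : List Char) (p : Nat) (hp : p ≠ 0) :
    ∀ ws : List String, List.Perm (ws.filter (wordOK2 cs p))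
      (ws.filter (wordOK cs p) ++ ws.filter (fun w => decide (w.length = 0))) := by
  intro ws
  induction ws with
  | nil => simp
  | cons w ws ih =>
    by_cases hw0 : w.length = 0
    · have hwe : w = "" := by
        apply String.toList_inj.mp
        have : w.toList.length = 0 := hw0
        simpa using List.length_eq_zero_iff.mp this
      have h2 : wordOK2 cs p w = true := by
        rw [wordOK2_iff]
        constructor
        · rw [hwe]; exact List.nil_prefix
        · rintro ⟨h, -⟩; exact hp h
      have h1 : wordOK cs p w = false := by
        simp [wordOK, hwe]
      simp only [List.filter_cons, h1, h2, hw0, decide_true, if_true, Bool.false_eq_true,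
        if_false]
      exact (ih.cons w).trans List.perm_middle.symm
    · have heq : wordOK2 cs p w = wordOK cs p w := by
        have hwne : w ≠ "" := by
          intro hc
          apply hw0
          rw [hc]
          rfl
        apply bool_eq_of_iff
        rw [wordOK2_iff, wordOK_iff]
        constructor
        · intro h; exact ⟨hwne, h.1⟩
        · intro h; exact ⟨h.2, by rintro ⟨-, hl⟩; exact hw0 hl⟩
    -- w ≠ "": both filters agree, empty-filter drops w
      simp only [List.filter_cons, heq, hw0, decide_false]
      cases hOK : wordOK cs p w with
      | true => simpa using ih.cons w
      | false => simpa using ih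
  
-- the key step: expanding the head preserves obest (works with '' ∈ strs too)
lemma obest_expand {strs : List String} {cs : List Char} (c p : Int) (hp : 0 ≤ p)
    (hplen : p.toNat ≠ cs.length) (rest : List (Int × Int)) :
    obest strs cs (childrenA cs c p strs ++ rest)
      = obest strs cs ((c, p) :: rest) := by
  unfold childrenA
  rw [obest_map_children cs c p hp (strs.filter (wordOK2 cs p.toNat)) rest]
  have hhead : obest strs cs ((c, p) :: rest)
      = ominI (ocostA strs cs (c, p)) (obest strs cs rest) := rfl
  rw [hhead]
  congr 1
  simp only [ocostA]
  -- show the folded value over filter wordOK2 equals Fm cs p.toNat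
  have hfold : ((strs.filter (wordOK2 cs p.toNat)).map
      (fun w => (Fm strs cs (p.toNat + w.length)).map (· + 1))).foldr ominN none
      = Fm strs cs p.toNat := by
    by_cases hp0 : p.toNat = 0
    · -- at position 0 the filters coincide (empty word skipped by the visited set)
      have hcong : strs.filter (wordOK2 cs p.toNat) = strs.filter (wordOK cs p.toNat) := by
        apply List.filter_congr
        intro w _
        apply bool_eq_of_iff
        rw [wordOK2_iff, wordOK_iff]
        constructor
        · intro h
          refine ⟨?_, h.1⟩
          intro hc
          exact h.2 ⟨hp0, by rw [hc]; rfl⟩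
        · intro h
          refine ⟨h.2, ?_⟩
          rintro ⟨-, hl⟩
          apply h.1
          apply String.toList_inj.mp
          have : w.toList.length = 0 := hl
          simpa using List.length_eq_zero_iff.mp this
      rw [hcong, Fm_eq strs cs p.toNat, if_neg hplen]
    · -- p ≠ 0: split off the empty-word copies and absorb them
      have hperm := filter_wordOK2_split cs p.toNat hp0 strs
      rw [foldr_ominN_perm (hperm.map _)]
      rw [List.map_append, foldr_ominN_append]
      have hA : ((strs.filter (wordOK cs p.toNat)).map
          (fun w => (Fm strs cs (p.toNat + w.length)).map (· + 1))).foldr ominN none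
          = Fm strs cs p.toNat := by
        rw [Fm_eq strs cs p.toNat, if_neg hplen]
      rw [hA]
      -- every element of the empty part equals (Fm cs p.toNat).map (+1)
      have hEconst : ∀ x ∈ (strs.filter (fun w => decide (w.length = 0))).map
          (fun w => (Fm strs cs (p.toNat + w.length)).map (· + 1)),
          x = (Fm strs cs p.toNat).map (· + 1) := by
        intro x hx
        simp only [List.mem_map, List.mem_filter, decide_eq_true_eq] at hx
        obtain ⟨w, ⟨_, hw0⟩, rfl⟩ := hx
        rw [hw0, Nat.add_zero]
      have hEfold : ∀ l : List (Option Nat), (∀ x ∈ l, x = (Fm strs cs p.toNat).map (· + 1)) →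
          ominN (Fm strs cs p.toNat) (l.foldr ominN none) = Fm strs cs p.toNat := by
        intro l
        induction l with
        | nil => intro _; exact ominN_none_right _
        | cons a l ihl =>
          intro hall
          have ha := hall a (by simp)
          simp only [List.foldr]
          rw [← ominN_assoc]
          have habs : ominN (Fm strs cs p.toNat) a = Fm strs cs p.toNat := by
            rw [ha]
            cases Fm strs cs p.toNat with
            | none => rfl
            | some k => simp [ominN, Option.map_some]
          rw [habs]
          exact ihl (fun x hx => hall x (by simp [hx]))
      exact hEfold _ hEconst
  rw [hfold]
  rfl

-- termination weight for the '' ∉ strs case: exponential in the remaining length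
lemma WqA_children_lt (strs : List String) (cs : List Char) (Lc : Nat)
    (hLc : Lc = cs.length) (hE : "" ∉ strs) (c p : Int) (hp : 0 ≤ p) (hpl : p.toNat ≤ Lc) :
    WqA strs.length Lc (childrenA cs c p strs) < WtA strs.length Lc (c, p) := by
  have hB : 0 < (strs.length + 1) ^ (Lc - p.toNat) := pow_pos (by omega) _
  have hbound : ∀ x ∈ (childrenA cs c p strs).map (WtA strs.length Lc),
      x ≤ (strs.length + 1) ^ (Lc - p.toNat) := by
    intro x hx
    simp only [childrenA, List.map_map, List.mem_map, Function.comp] at hx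
    obtain ⟨w, hw, hval⟩ := hx
    have hok := (List.mem_filter.mp hw).2
    have hmem := (List.mem_filter.mp hw).1
    have h2 := wordOK2_facts (p := p.toNat) (by omega) hok
    have h1 : 1 ≤ w.length := by
      cases hl : w.length with
      | zero =>
        exfalso
        apply hE
        have hwe : w = "" := by
          apply String.toList_inj.mp
          have : w.toList.length = 0 := hl
          simpa using List.length_eq_zero_iff.mp this
        rwa [hwe] at hmem
      | succ n => omega
    rw [← hval]
    simp only [WtA]
    have ht : (p + (w.length : Int)).toNat = p.toNat + w.length := by omega
    rw [ht]
    exact Nat.pow_le_pow_right (by omega) (by omega)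
  have hlen : ((childrenA cs c p strs).map (WtA strs.length Lc)).length ≤ strs.length := by
    simp only [childrenA, List.length_map]
    exact List.length_filter_le _ _
  have hsum := List.sum_le_card_nsmul ((childrenA cs c p strs).map (WtA strs.length Lc)) _ hbound
  simp only [smul_eq_mul] at hsum
  have h1 : WqA strs.length Lc (childrenA cs c p strs)
      ≤ strs.length * (strs.length + 1) ^ (Lc - p.toNat) := by
    unfold WqA
    exact le_trans hsum (Nat.mul_le_mul_right _ hlen)
  have h2 : WtA strs.length Lc (c, p)
      = (strs.length + 1) * (strs.length + 1) ^ (Lc - p.toNat) := by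
    unfold WtA
    simp only
    rw [show Lc + 1 - (c, p).2.toNat = (Lc - p.toNat) + 1 by omega, pow_succ]
    ring
  rw [h2]
  calc WqA strs.length Lc (childrenA cs c p strs)
      ≤ strs.length * (strs.length + 1) ^ (Lc - p.toNat) := h1
    _ < (strs.length + 1) * (strs.length + 1) ^ (Lc - p.toNat) := by
        exact Nat.mul_lt_mul_of_lt_of_le (by omega) (le_refl _) hB

-- termination weight for the spellable case: exponential in K minus the count
def WtB (m K : Nat) (e : Int × Int) : Nat := (m + 1) ^ (K + 1 - e.1.toNat)

def WqB (m K : Nat) (l : List (Int × Int)) : Nat := (l.map (WtB m K)).sum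

lemma WqB_perm {m K : Nat} {l l' : List (Int × Int)} (h : List.Perm l l') :
    WqB m K l = WqB m K l' := by
  unfold WqB
  exact List.Perm.sum_eq (h.map _)

lemma WqB_append (m K : Nat) (l l' : List (Int × Int)) :
    WqB m K (l ++ l') = WqB m K l + WqB m K l' := by
  simp [WqB]

lemma WqB_children_lt (strs : List String) (cs : List Char) (K : Nat)
    (c p : Int) (hc0 : 0 ≤ c) (hcK : c.toNat ≤ K) :
    WqB strs.length K (childrenA cs c p strs) < WtB strs.length K (c, p) := by
  have hB : 0 < (strs.length + 1) ^ (K - c.toNat) := pow_pos (by omega) _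
  have hbound : ∀ x ∈ (childrenA cs c p strs).map (WtB strs.length K),
      x ≤ (strs.length + 1) ^ (K - c.toNat) := by
    intro x hx
    simp only [childrenA, List.map_map, List.mem_map, Function.comp] at hx
    obtain ⟨w, hw, hval⟩ := hx
    rw [← hval]
    simp only [WtB]
    have ht : (c + 1).toNat = c.toNat + 1 := by omega
    rw [ht]
    exact Nat.pow_le_pow_right (by omega) (by omega)
  have hlen : ((childrenA cs c p strs).map (WtB strs.length K)).length ≤ strs.length := by
    simp only [childrenA, List.length_map]
    exact List.length_filter_le _ _
  have hsum := List.sum_le_card_nsmul ((childrenA cs c p strs).map (WtB strs.length K)) _ hbound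
  simp only [smul_eq_mul] at hsum
  have h1 : WqB strs.length K (childrenA cs c p strs)
      ≤ strs.length * (strs.length + 1) ^ (K - c.toNat) := by
    unfold WqB
    exact le_trans hsum (Nat.mul_le_mul_right _ hlen)
  have h2 : WtB strs.length K (c, p)
      = (strs.length + 1) * (strs.length + 1) ^ (K - c.toNat) := by
    unfold WtB
    simp only
    rw [show K + 1 - (c, p).1.toNat = (K - c.toNat) + 1 by omega, pow_succ]
    ring
  rw [h2]
  calc WqB strs.length K (childrenA cs c p strs)
      ≤ strs.length * (strs.length + 1) ^ (K - c.toNat) := h1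
    _ < (strs.length + 1) * (strs.length + 1) ^ (K - c.toNat) := by
        exact Nat.mul_lt_mul_of_lt_of_le (by omega) (le_refl _) hB

-- the main A-side lemma, case '' ∉ strs (weight = remaining length)
lemma loopA_eq {strs : List String} {t : String} (hE : "" ∉ strs) :
    ∀ (fuel : Nat) (pq : List (Int × Int)),
      WqA strs.length t.toList.length pq < fuel →
      pq.Pairwise PLe →
      (∀ e ∈ pq, 0 ≤ e.2 ∧ e.2.toNat ≤ t.toList.length) →
      loopA strs t (PySem.Set.ofList [(0 : Int)]) fuel pq
        = some ((obest strs t.toList pq).getD (-1)) := by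
  have hlen : t.length = t.toList.length := rfl
  intro fuel
  induction fuel with
  | zero =>
    intro pq hW _ _
    omega
  | succ f ih =>
    intro pq hW hPW hBnd
    match pq with
    | [] => simp [loopA, obest]
    | (c, p) :: rest =>
      obtain ⟨hp0, hpl⟩ := hBnd (c, p) (by simp)
      simp only at hp0 hpl
      by_cases hEq : p = PySem.Str.len t
      · simp only [loopA]
        rw [if_pos hEq]
        have hopc : ocostA strs t.toList (c, p) = some c := by
          simp only [ocostA]
          have hpt : p.toNat = t.toList.length := by
            rw [strlen_eq] at hEq; omega
          rw [hpt, Fm_len]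
          simp
        have hob : obest strs t.toList ((c, p) :: rest)
            = ominI (some c) (obest strs t.toList rest) := by
          simp only [obest, List.foldr] at *
          rw [hopc]
        rw [hob]
        cases hrest : obest strs t.toList rest with
        | none => simp [ominI]
        | some v =>
          have hcv : c ≤ v := by
            refine obest_ge c rest ?_ v hrest
            intro e he
            have := (List.pairwise_cons.mp hPW).1 e he
            unfold PLe at this
            simp only at this
            omega
          simp only [ominI, Option.getD_some, Option.some.injEq]
          omega
      · by_cases hGt : PySem.Str.len t < p
        · exfalso
          rw [strlen_eq] at hGt
          omega
        · simp only [loopA]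
          rw [if_neg hEq, if_neg hGt]
          have hperm := @foldl_pushA_perm strs t c p hp0 strs rest
          have hmem' : ∀ e ∈ strs.foldl (pushStepA (PySem.Set.ofList [(0 : Int)])
              (PySem.Str.slice t (some p) none) c p) rest,
              0 ≤ e.2 ∧ e.2.toNat ≤ t.toList.length := by
            intro e he
            rcases List.mem_append.mp (hperm.mem_iff.mp he) with hch | hr
            · simp only [childrenA, List.mem_map] at hch
              obtain ⟨w, hwf, rfl⟩ := hch
              have h2 := wordOK2_facts (p := p.toNat) (by omega) (List.mem_filter.mp hwf).2
              constructor
              · simp only; omega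
              · simp only; omega
            · exact hBnd e (by simp [hr])
          have hPW' := foldl_pushA_pairwise (PySem.Set.ofList [(0 : Int)])
              (PySem.Str.slice t (some p) none) c p strs rest (List.pairwise_cons.mp hPW).2
          have hW' : WqA strs.length t.toList.length (strs.foldl
              (pushStepA (PySem.Set.ofList [(0 : Int)])
                (PySem.Str.slice t (some p) none) c p) rest) < f := by
            rw [WqA_perm hperm, WqA_append]
            have h1 := WqA_children_lt strs t.toList t.toList.length rfl hE c p hp0 hpl
            have h2 : WqA strs.length t.toList.length ((c, p) :: rest)
                = WtA strs.length t.toList.length (c, p)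
                  + WqA strs.length t.toList.length rest := by
              simp [WqA]
            omega
          rw [ih _ hW' hPW' hmem']
          have hoeq : obest strs t.toList (strs.foldl (pushStepA (PySem.Set.ofList [(0 : Int)])
              (PySem.Str.slice t (some p) none) c p) rest)
              = obest strs t.toList ((c, p) :: rest) := by
            rw [obest_perm hperm]
            refine obest_expand c p hp0 ?_ rest
            rw [strlen_eq] at hEq
            omega
          rw [hoeq]

-- the main A-side lemma, spellable case (works with '' ∈ strs; weight = count-based)
lemma loopA_eq2 {strs : List String} {t : String} (K : Nat) :
    ∀ (fuel : Nat) (pq : List (Int × Int)),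
      WqB strs.length K pq < fuel →
      pq.Pairwise PLe →
      (∀ e ∈ pq, 0 ≤ e.1 ∧ 0 ≤ e.2 ∧ e.2.toNat ≤ t.toList.length) →
      obest strs t.toList pq = some (K : Int) →
      loopA strs t (PySem.Set.ofList [(0 : Int)]) fuel pq = some (K : Int) := by
  intro fuel
  induction fuel with
  | zero =>
    intro pq hW _ _ _
    omega
  | succ f ih =>
    intro pq hW hPW hBnd hOB
    match pq with
    | [] => simp [obest] at hOB
    | (c, p) :: rest =>
      obtain ⟨hc0, hp0, hpl⟩ := hBnd (c, p) (by simp)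
      simp only at hc0 hp0 hpl
      -- popped count is at most K
      have hcK : c ≤ (K : Int) := by
        obtain ⟨e, he, hce⟩ := obest_mem _ _ hOB
        have hcle : c ≤ e.1 := by
          rcases List.mem_cons.mp he with rfl | he'
          · omega
          · have := (List.pairwise_cons.mp hPW).1 e he'
            unfold PLe at this
            omega
        have heK : e.1 ≤ (K : Int) := by
          simp only [ocostA] at hce
          cases hF : Fm strs t.toList e.2.toNat with
          | none => rw [hF] at hce; simp at hce
          | some k => rw [hF] at hce; simp at hce; omega
        omega
      by_cases hEq : p = PySem.Str.len t
      · simp only [loopA]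
        rw [if_pos hEq]
        -- popped goal: its cost is exactly c, and obest is a lower bound
        have hopc : ocostA strs t.toList (c, p) = some c := by
          simp only [ocostA]
          have hpt : p.toNat = t.toList.length := by
            rw [strlen_eq] at hEq
            have : t.length = t.toList.length := rfl
            omega
          rw [hpt, Fm_len]
          simp
        have hKc : (K : Int) ≤ c := obest_lb _ _ hOB (c, p) (by simp) c hopc
        have : c = (K : Int) := by omega
        rw [this]
      · by_cases hGt : PySem.Str.len t < p
        · exfalso
          rw [strlen_eq] at hGt
          have : t.length = t.toList.length := rfl
          omega
        · simp only [loopA]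
          rw [if_neg hEq, if_neg hGt]
          have hperm := @foldl_pushA_perm strs t c p hp0 strs rest
          have hmem' : ∀ e ∈ strs.foldl (pushStepA (PySem.Set.ofList [(0 : Int)])
              (PySem.Str.slice t (some p) none) c p) rest,
              0 ≤ e.1 ∧ 0 ≤ e.2 ∧ e.2.toNat ≤ t.toList.length := by
            intro e he
            rcases List.mem_append.mp (hperm.mem_iff.mp he) with hch | hr
            · simp only [childrenA, List.mem_map] at hch
              obtain ⟨w, hwf, rfl⟩ := hch
              have h2 := wordOK2_facts (p := p.toNat) (by omega) (List.mem_filter.mp hwf).2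
              refine ⟨by simp only; omega, by simp only; omega, by simp only; omega⟩
            · exact hBnd e (by simp [hr])
          have hPW' := foldl_pushA_pairwise (PySem.Set.ofList [(0 : Int)])
              (PySem.Str.slice t (some p) none) c p strs rest (List.pairwise_cons.mp hPW).2
          have hW' : WqB strs.length K (strs.foldl
              (pushStepA (PySem.Set.ofList [(0 : Int)])
                (PySem.Str.slice t (some p) none) c p) rest) < f := by
            rw [WqB_perm hperm, WqB_append]
            have h1 := WqB_children_lt strs t.toList K c p hc0 (by omega)
            have h2 : WqB strs.length K ((c, p) :: rest)
                = WtB strs.length K (c, p) + WqB strs.length K rest := by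
              simp [WqB]
            omega
          have hOB' : obest strs t.toList (strs.foldl (pushStepA (PySem.Set.ofList [(0 : Int)])
              (PySem.Str.slice t (some p) none) c p) rest) = some (K : Int) := by
            rw [obest_perm hperm]
            rw [obest_expand c p hp0 ?_ rest]
            · exact hOB
            · rw [strlen_eq] at hEq
              have : t.length = t.toList.length := rfl
              omega
          exact ih _ hW' hPW' hmem' hOB'

-- ---- B-side machinery ----

def repF (strs : List String) (cs : List Char) (j : Nat) : Int :=
  match Fm strs cs j with
  | some k => (k : Int)
  | none => (cs.length : Int) + 1

def descList : Nat → List Int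
  | 0 => []
  | k + 1 => (k : Int) :: descList k

lemma range_desc_map (n : Nat) :
    (List.range n).map (fun k : Nat => (n : Int) - 1 - (k : Int)) = descList n := by
  induction n with
  | zero => simp [descList]
  | succ m ih =>
    rw [List.range_succ_eq_map, descList]
    simp only [List.map_cons, List.map_map, Nat.cast_zero]
    congr 1
    · push_cast; ring
    · rw [← ih]
      apply List.map_congr_left
      intro k hk
      simp only [Function.comp]
      push_cast; ring

lemma pyRange_desc (n : Nat) :
    PySem.List.pyRange ((n : Int) - 1) (-1) (-1) = descList n := by
  cases n with
  | zero => decide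
  | succ m =>
    rw [PySem.List.pyRange]
    rw [if_neg (by norm_num : ¬((-1 : Int) = 0))]
    simp only
    rw [if_neg (by norm_num : ¬((0 : Int) < -1))]
    rw [if_pos (by push_cast; omega : (-1 : Int) < (Nat.succ m : Int) - 1)]
    have hc : ((((Nat.succ m : Int) - 1 - -1 + - -1 - 1) / - -1)).toNat = Nat.succ m := by
      push_cast
      norm_num
    rw [hc, ← range_desc_map]
    apply List.map_congr_left
    intro k hk
    push_cast
    ring

def combineI (acc : Int) : Option Nat → Int
  | none => acc
  | some v => min acc (v : Int)

lemma ominI_none_right (a : Option Int) : ominI a none = a := by cases a <;> rfl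

lemma slice_eq_word_iff (t : String) (k : Nat) (w : String) :
    PySem.Str.slice t (some (k : Int)) (some ((k : Int) + PySem.Str.len w)) = w
      ↔ w.toList <+: t.toList.drop k := by
  rw [← String.toList_inj, PySem.Str.toList_slice]
  simp only [PySem.Chars.slice_eq_listSlice]
  rw [strlen_eq, PySem.List.slice_natCast_add]
  rw [List.prefix_iff_eq_take]
  constructor
  · intro h; exact h.symm
  · intro h; exact h.symm

lemma combineI_step (acc : Int) (v : Nat) (R : Option Nat) :
    combineI (min acc ((v : Int) + 1)) R = combineI acc (ominN (some (v + 1)) R) := by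
  cases R with
  | none =>
    simp only [combineI, ominN]
    push_cast
    ring_nf
  | some u =>
    simp only [combineI, ominN]
    rw [min_assoc]
    push_cast [Nat.cast_min]
    ring_nf

lemma bInner_fold {strs : List String} {t : String} (k : Nat)
    (hk : k < t.toList.length) (dp : List Int)
    (hdp : ∀ j, k < j → j ≤ t.toList.length → dp.getD j 0 = repF strs t.toList j)
    (hdpk : dp.getD k 0 = (t.toList.length : Int) + 1) :
    ∀ (ws : List String) (acc : Int),
      acc ≤ (t.toList.length : Int) + 1 →
      ws.foldl (fun best w =>
        if PySem.Str.slice t (some (k : Int)) (some ((k : Int) + PySem.Str.len w)) = w ∧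
            PySem.List.pyGetD dp ((k : Int) + PySem.Str.len w) 0 + 1 < best
        then PySem.List.pyGetD dp ((k : Int) + PySem.Str.len w) 0 + 1 else best) acc
      = combineI acc (((ws.filter (wordOK t.toList k)).map
          (fun w => (Fm strs t.toList (k + w.length)).map (· + 1))).foldr ominN none) := by
  intro ws
  induction ws with
  | nil => intro acc _; simp [combineI]
  | cons w ws ih =>
    intro acc hacc
    simp only [List.foldl_cons, List.filter_cons]
    by_cases hw0 : w = ""
    · -- the empty word reads dp[k] (still INF) and never lowers best
      subst hw0
      have hok : wordOK t.toList k "" = false := by simp [wordOK]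
      have hidx : (k : Int) + PySem.Str.len "" = ((k : Nat) : Int) := by
        rw [strlen_eq]
        norm_num
      have hget : PySem.List.pyGetD dp ((k : Int) + PySem.Str.len "") 0
          = (t.toList.length : Int) + 1 := by
        rw [hidx, PySem.List.pyGetD_natCast]
        exact hdpk
      rw [if_neg (by rw [hget]; rintro ⟨-, h2⟩; omega)]
      rw [hok]
      simp only [Bool.false_eq_true, if_false]
      exact ih acc hacc
    · have hwne : w ≠ "" := hw0
      by_cases hok : wordOK t.toList k w = true
      · have hpre : w.toList <+: t.toList.drop k := by
          have h' := hok
          simp only [wordOK, Bool.and_eq_true, decide_eq_true_eq] at h'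
          exact h'.2
        have hcond1 : PySem.Str.slice t (some (k : Int)) (some ((k : Int) + PySem.Str.len w)) = w :=
          (slice_eq_word_iff t k w).mpr hpre
        obtain ⟨hw1, hw2⟩ := wordOK_facts hok
        have hget : PySem.List.pyGetD dp ((k : Int) + PySem.Str.len w) 0
            = repF strs t.toList (k + w.length) := by
          rw [strlen_eq,
            show (k : Int) + (w.length : Int) = ((k + w.length : Nat) : Int) by push_cast; ring,
            PySem.List.pyGetD_natCast]
          exact hdp (k + w.length) (by omega) (by omega)
        rw [if_pos hok, hget]
        simp only [List.map_cons, List.foldr_cons]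
        cases hF : Fm strs t.toList (k + w.length) with
        | none =>
          have hrep : repF strs t.toList (k + w.length) = (t.toList.length : Int) + 1 := by
            unfold repF; rw [hF]
          rw [hrep, if_neg (by intro hc; omega)]
          rw [show (Option.map (· + 1) (none : Option Nat)) = none from rfl]
          rw [show ominN none (((ws.filter (wordOK t.toList k)).map
            (fun w => (Fm strs t.toList (k + w.length)).map (· + 1))).foldr ominN none)
            = ((ws.filter (wordOK t.toList k)).map
            (fun w => (Fm strs t.toList (k + w.length)).map (· + 1))).foldr ominN none from rfl]
          exact ih acc hacc
        | some v =>
          have hrep : repF strs t.toList (k + w.length) = (v : Int) := by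
            unfold repF; rw [hF]
          have hvk := Fm_le strs t.toList (t.toList.length - (k + w.length)) (k + w.length) v rfl hF
          rw [hrep]
          rw [show (Option.map (· + 1) (some v)) = some (v + 1) from rfl]
          by_cases hlt : (v : Int) + 1 < acc
          · rw [if_pos ⟨hcond1, hlt⟩]
            have h1 := ih ((v : Int) + 1) (by push_cast; omega)
            rw [h1, show (v : Int) + 1 = min acc ((v : Int) + 1) from (min_eq_right (by omega)).symm,
              combineI_step]
          · rw [if_neg (fun hc => hlt hc.2)]
            rw [ih acc hacc, ← combineI_step, min_eq_left (by omega)]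
      · have hnpre : ¬ (w.toList <+: t.toList.drop k) := by
          intro hc
          exact hok (by simp only [wordOK, Bool.and_eq_true, decide_eq_true_eq]; exact ⟨hwne, hc⟩)
        have hcond1 : ¬ (PySem.Str.slice t (some (k : Int))
            (some ((k : Int) + PySem.Str.len w)) = w) := by
          intro hc
          exact hnpre ((slice_eq_word_iff t k w).mp hc)
        rw [if_neg (fun hc => hcond1 hc.1)]
        rw [show (wordOK t.toList k w) = false by simpa using hok]
        simp only [Bool.false_eq_true, if_false]
        exact ih acc hacc

-- the inner fold computes repF
lemma bInner_eq {strs : List String} {t : String} (k : Nat)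
    (hk : k < t.toList.length) (dp : List Int)
    (hdp : ∀ j, k < j → j ≤ t.toList.length → dp.getD j 0 = repF strs t.toList j)
    (hdpk : dp.getD k 0 = (t.toList.length : Int) + 1) :
    bInner strs t dp (k : Int) = repF strs t.toList k := by
  have hlen : t.length = t.toList.length := rfl
  have hfold := bInner_fold k hk dp hdp hdpk strs
      (PySem.Str.len t + 1) (by rw [strlen_eq, hlen])
  simp only [bInner]
  rw [hfold]
  rw [show ((strs.filter (wordOK t.toList k)).map
      (fun w => (Fm strs t.toList (k + w.length)).map (· + 1))).foldr ominN none
      = Fm strs t.toList k by rw [Fm_eq strs t.toList k, if_neg (by omega)]]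
  unfold repF
  cases hF : Fm strs t.toList k with
  | none =>
    simp only [combineI]
    rw [strlen_eq, hlen]
  | some v =>
    have hv := Fm_le strs t.toList (t.toList.length - k) k v rfl hF
    simp only [combineI]
    rw [strlen_eq, hlen]
    rw [min_eq_right (by omega)]

lemma bLoop_eq {strs : List String} {t : String} :
    ∀ (kk : Nat) (dp : List Int), kk ≤ t.toList.length →
      dp.length = t.toList.length + 1 →
      (∀ j, kk ≤ j → j ≤ t.toList.length → dp.getD j 0 = repF strs t.toList j) →
      (∀ j, j < kk → dp.getD j 0 = (t.toList.length : Int) + 1) →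
      ∀ j, j ≤ t.toList.length →
        ((descList kk).foldl (bOuter strs t) dp).getD j 0 = repF strs t.toList j := by
  intro kk
  induction kk with
  | zero =>
    intro dp _ _ hdp _ j hj
    simpa [descList] using hdp j (by omega) hj
  | succ kk ih =>
    intro dp hkk hdplen hdp hlow j hj
    simp only [descList, List.foldl_cons]
    have hbo : bOuter strs t dp (kk : Int) = dp.set kk (repF strs t.toList kk) := by
      unfold bOuter
      rw [Int.toNat_natCast]
      congr 1
      exact bInner_eq kk (by omega) dp (fun j hj1 hj2 => hdp j (by omega) hj2)
        (hlow kk (by omega))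
    rw [hbo]
    refine ih _ (by omega) (by simp [hdplen]) ?_ ?_ j hj
    · intro j hj1 hj2
      rcases eq_or_ne j kk with rfl | hne
      · rw [List.getD_eq_getElem?_getD, List.getElem?_set_self (by omega), Option.getD_some]
      · rw [List.getD_eq_getElem?_getD, List.getElem?_set_ne (by omega),
          ← List.getD_eq_getElem?_getD]
        exact hdp j (by omega) hj2
    · intro j hj1
      rw [List.getD_eq_getElem?_getD, List.getElem?_set_ne (by omega),
        ← List.getD_eq_getElem?_getD]
      exact hlow j (by omega)

lemma pyGetD_zero (xs : List Int) (d : Int) : PySem.List.pyGetD xs 0 d = xs.getD 0 d := by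
  rw [show (0 : Int) = ((0 : Nat) : Int) from rfl, PySem.List.pyGetD_natCast]

-- B's result, characterised by Fm
lemma solution_alt_Fm (strs : List String) (t : String) :
    solution_alt strs t
      = (match Fm strs t.toList 0 with
          | some k => (k : Int)
          | none => -1) := by
  have hlen : t.length = t.toList.length := rfl
  simp only [solution_alt]
  rw [show PySem.Str.len t - 1 = ((t.length : Int)) - 1 from by rw [strlen_eq], pyRange_desc]
  have hdp0 : ∀ j, t.length ≤ j → j ≤ t.toList.length →
      (List.replicate t.length (PySem.Str.len t + 1) ++ [(0 : Int)]).getD j 0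
        = repF strs t.toList j := by
    intro j hj1 hj2
    have hj : j = t.length := by omega
    subst hj
    rw [List.getD_eq_getElem?_getD, List.getElem?_append_right (by simp)]
    simp only [List.length_replicate, Nat.sub_self, List.getElem?_cons_zero, Option.getD_some]
    unfold repF
    rw [hlen, Fm_len]
    simp
  have hlow0 : ∀ j, j < t.length →
      (List.replicate t.length (PySem.Str.len t + 1) ++ [(0 : Int)]).getD j 0
        = (t.toList.length : Int) + 1 := by
    intro j hj
    rw [List.getD_eq_getElem?_getD, List.getElem?_append_left (by simpa using hj)]
    simp only [List.getElem?_replicate]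
    rw [if_pos hj, Option.getD_some, strlen_eq, hlen]
  have hfin := bLoop_eq t.length (List.replicate t.length (PySem.Str.len t + 1) ++ [(0 : Int)])
      (by omega) (by simp) hdp0 hlow0 0 (by omega)
  rw [pyGetD_zero, hfin]
  cases hF : Fm strs t.toList 0 with
  | none =>
    have hrep : repF strs t.toList 0 = (t.toList.length : Int) + 1 := by
      unfold repF; rw [hF]
    rw [hrep, if_neg (by rw [strlen_eq, hlen]; omega)]
  | some k =>
    have hk := Fm_le strs t.toList (t.toList.length - 0) 0 k rfl hF
    have hrep : repF strs t.toList 0 = (k : Int) := by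
      unfold repF; rw [hF]
    rw [hrep, if_pos (by rw [strlen_eq, hlen]; omega)]

-- ---- A-side results ----

-- '' ∉ strs: A computes Fm (terminates by the length-based weight)
lemma solution_eqA {strs : List String} {t : String} (hE : "" ∉ strs) :
    solution strs t
      = (match Fm strs t.toList 0 with
          | some k => (k : Int)
          | none => -1) := by
  have hlen : t.length = t.toList.length := rfl
  have hW : WqA strs.length t.toList.length [((0 : Int), (0 : Int))]
      < (strs.length + 1) ^ (t.length + 1) + 1 := by
    simp only [WqA, WtA, List.map_cons, List.map_nil, List.sum_cons, List.sum_nil]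
    rw [show ((0 : Int), (0 : Int)).2.toNat = 0 from rfl, Nat.sub_zero, hlen]
    omega
  have hA := loopA_eq hE ((strs.length + 1) ^ (t.length + 1) + 1) [((0 : Int), (0 : Int))] hW
      (by simp) (by intro e he; simp at he; subst he; simp)
  unfold solution
  rw [hA, Option.getD_some]
  have hob : obest strs t.toList [((0 : Int), (0 : Int))]
      = (Fm strs t.toList 0).map (fun k : Nat => (0 : Int) + (k : Int)) := by
    simp only [obest, List.foldr, ominI_none_right, ocostA]
    rw [show ((0 : Int), (0 : Int)).2.toNat = 0 from rfl]
    cases Fm strs t.toList 0 <;> rfl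
  rw [hob]
  cases Fm strs t.toList 0 with
  | none => rfl
  | some k => simp

-- t spellable: A returns the minimal count (terminates by the count-based weight),
-- with or without '' ∈ strs
lemma solution_eq2 {strs : List String} {t : String} (K : Nat)
    (hK : Fm strs t.toList 0 = some K) : solution strs t = (K : Int) := by
  have hlen : t.length = t.toList.length := rfl
  have hKlen : K ≤ t.toList.length := by
    have := Fm_le strs t.toList (t.toList.length - 0) 0 K rfl hK
    omega
  have hW : WqB strs.length K [((0 : Int), (0 : Int))]
      < (strs.length + 1) ^ (t.length + 1) + 1 := by
    simp only [WqB, WtB, List.map_cons, List.map_nil, List.sum_cons, List.sum_nil]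
    rw [show ((0 : Int), (0 : Int)).1.toNat = 0 from rfl, Nat.sub_zero]
    have : (strs.length + 1) ^ (K + 1) ≤ (strs.length + 1) ^ (t.length + 1) :=
      Nat.pow_le_pow_right (by omega) (by omega)
    omega
  have hOB : obest strs t.toList [((0 : Int), (0 : Int))] = some (K : Int) := by
    simp only [obest, List.foldr, ominI_none_right, ocostA]
    rw [show ((0 : Int), (0 : Int)).2.toNat = 0 from rfl, hK]
    simp
  have hA := loopA_eq2 K ((strs.length + 1) ^ (t.length + 1) + 1) [((0 : Int), (0 : Int))] hW
      (by simp) (by intro e he; simp at he; subst he; simp) hOB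
  unfold solution
  rw [hA, Option.getD_some]

-- ---- the only case where A's heap empties with '' ∈ strs: no usable first word ----

lemma foldl_pushA_nil {strs : List String} (t : String)
    (h : ∀ w ∈ strs, w ≠ "" → ¬ w.toList <+: t.toList) :
    ∀ (ws : List String), (∀ w ∈ ws, w ∈ strs) →
      ws.foldl (pushStepA (PySem.Set.ofList [(0 : Int)])
        (PySem.Str.slice t (some 0) none) 0 0) [] = [] := by
  intro ws
  induction ws with
  | nil => intro _; simp
  | cons w ws ih =>
    intro hsub
    have hw : w ∈ strs := hsub w (by simp)
    simp only [List.foldl_cons]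
    have hstep : pushStepA (PySem.Set.ofList [(0 : Int)])
        (PySem.Str.slice t (some 0) none) 0 0 [] w = [] := by
      by_cases hw0 : w = ""
      · subst hw0
        have hfind : PySem.Str.find (PySem.Str.slice t (some 0) none) "" = 0 := by
          rw [PySem.Str.find_eq]
          exact PySem.Chars.find_nil _
        simp only [pushStepA, contains_zero_set]
        rw [if_pos hfind]
        rw [if_pos (by rw [show PySem.Str.len "" = 0 from by decide]; decide)]
      · by_cases hc : PySem.Str.find (PySem.Str.slice t (some 0) none) w = 0
        · exfalso
          have hpre : w.toList <+: t.toList := by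
            have := (pushA_prefix t w 0 le_rfl).mp hc
            simpa using this
          exact h w hw hw0 hpre
        · simp only [pushStepA]
          rw [if_neg hc]
    rw [hstep]
    exact ih (fun x hx => hsub x (by simp [hx]))

lemma solution_no_match (strs : List String) (t : String) (ht : t ≠ "")
    (h : ∀ w ∈ strs, w ≠ "" → ¬ w.toList <+: t.toList) : solution strs t = -1 := by
  have hlen0 : t.length ≠ 0 := by
    intro hc
    apply ht
    apply String.toList_inj.mp
    have : t.toList.length = 0 := hc
    simpa using List.length_eq_zero_iff.mp this
  unfold solution
  simp only [loopA]
  rw [if_neg (by rw [strlen_eq]; omega), if_neg (by rw [strlen_eq]; omega)]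
  rw [foldl_pushA_nil t h strs (fun _ hh => hh)]
  simp [loopA]

-- ===== VERDICT (by name: the statement is the Claim_ definition above) =====
theorem solution_spec : Claim_equal_solution := by
  intro strs t _ hpre
  unfold Spec_solution
  rw [solution_alt_Fm]
  by_cases hE : "" ∈ strs
  · cases hF : Fm strs t.toList 0 with
    | some K => rw [solution_eq2 K hF]
    | none =>
      have ht : t ≠ "" := by
        intro hc
        subst hc
        rw [show ("" : String).toList = [] from rfl, Fm_eq] at hF
        simp at hF
      have hnm : ∀ w ∈ strs, w ≠ "" → ¬ w.toList <+: t.toList := by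
        intro w hw hwne hpref
        exact hpre ⟨hE, hF, w, hw, hwne, hpref⟩
      rw [solution_no_match strs t ht hnm]
  · rw [solution_eqA hE]
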